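-- pv_equiv track=rewrite | github.com/HotelASP/RT | portscanner-mrib.py | parse_port_specification
-- ===== SOURCE A (Python) =====
-- from typing import Dict, List, Optional, Tuple, Any, Set
--
-- def parse_port_specification(start_port: int, end_port: int, port_spec: Optional[str]) -> List[int]:
--     # Convert a ports specification into a sorted unique list in [1, 65535].
--     ports: List[int] = []
--     if port_spec is None:
--         # Range [start_port, end_port] inclusive
--         for p in range(start_port, end_port + 1):
--             ports.append(p)
--     else:
--         for token in port_spec.split(","):
--             token = token.strip()
--             if not token:
--                 continue
--             if "-" in token:
--                 left, right = token.split("-", 1)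
--                 try:
--                     start = int(left)
--                     stop = int(right)
--                 except ValueError:
--                     continue
--                 if start > stop:
--                     start, stop = stop, start
--                 for p in range(start, stop + 1):
--                     ports.append(p)
--             else:
--                 try:
--                     ports.append(int(token))
--                 except ValueError:
--                     continue
--
--     # Filter invalid and deduplicate then sort
--     valid_sorted_unique: List[int] = []
--     seen = set()
--     for p in ports:
--         if p < 1 or p > 65535:
--             continue
--         if p in seen:
--             continue
--         seen.add(p)
--         valid_sorted_unique.append(p)
--
--     valid_sorted_unique.sort()
--     return valid_sorted_unique
-- ===== SOURCE B (Python) =====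
-- def parse_port_specification(start_port, end_port, port_spec):
--     # Same token parsing as the spec requires, but collect clipped intervals,
--     # sort them by start, and expand with a fused merge (skip already-covered
--     # prefixes) instead of appending every port, deduping with a set and sorting.
--     intervals = []
--
--     def add(lo, hi):
--         lo = max(lo, 1)
--         hi = min(hi, 65535)
--         if lo <= hi:
--             intervals.append((lo, hi))
--
--     if port_spec is None:
--         add(start_port, end_port)
--     else:
--         for token in port_spec.split(","):
--             token = token.strip()
--             if not token:
--                 continue
--             if "-" in token:
--                 left, right = token.split("-", 1)
--                 try:
--                     start = int(left)
--                     stop = int(right)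
--                 except ValueError:
--                     continue
--                 if start > stop:
--                     start, stop = stop, start
--                 add(start, stop)
--             else:
--                 try:
--                     p = int(token)
--                 except ValueError:
--                     continue
--                 add(p, p)
--
--     intervals.sort(key=lambda iv: iv[0])
--     out = []
--     m = 0  # highest port emitted so far (all ports are >= 1)
--     for lo, hi in intervals:
--         out.extend(range(max(lo, m + 1), hi + 1))
--         m = max(m, hi)
--     return out
-- ===== Notes on version B (the rewrite author's own statement) =====
-- stated objective: alternative
-- what changed: B keeps A's token-parsing rules but emits one clipped interval [max(lo,1), min(hi,65535)] per token instead of appending every port, then sorts the few intervals by start and expands them with a fused merge pass that skips already-covered prefixes, so the per-port list, the seen-set dedupe pass and the final sort over all ports disappear.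
import Mathlib
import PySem

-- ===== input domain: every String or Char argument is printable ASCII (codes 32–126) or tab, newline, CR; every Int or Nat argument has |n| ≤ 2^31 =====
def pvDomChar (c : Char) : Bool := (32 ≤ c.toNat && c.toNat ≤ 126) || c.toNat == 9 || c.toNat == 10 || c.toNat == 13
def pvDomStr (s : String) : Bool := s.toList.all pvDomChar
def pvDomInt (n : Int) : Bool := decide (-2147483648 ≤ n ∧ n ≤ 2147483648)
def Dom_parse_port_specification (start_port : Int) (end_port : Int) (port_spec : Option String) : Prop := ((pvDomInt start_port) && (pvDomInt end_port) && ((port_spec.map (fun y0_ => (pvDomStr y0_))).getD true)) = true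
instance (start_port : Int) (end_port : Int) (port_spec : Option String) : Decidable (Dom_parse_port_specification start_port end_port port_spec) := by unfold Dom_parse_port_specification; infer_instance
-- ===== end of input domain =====

-- B replaces A's per-port append + set-dedupe + sort by clipped intervals
-- sorted by start and expanded with a fused merge pass (objective: alternative
-- algorithm, same cost on typical inputs; token parsing rules unchanged).


-- ===== PORT A =====
-- loop body of A's token loop (one `for token in port_spec.split(",")` step)
def pvStepA (acc : List Int) (token0 : String) : List Int :=
  let token := PySem.Str.strip token0
  if token = "" then acc
  else if PySem.Str.isIn "-" token then
    let parts := (PySem.Str.splitMax? token "-" 1).getD []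
    match PySem.Int.ofStr? (parts.getD 0 ""), PySem.Int.ofStr? (parts.getD 1 "") with
    | some start, some stop =>
      let se := if start > stop then (stop, start) else (start, stop)
      (PySem.List.pyRange se.1 (se.2 + 1) 1).foldl (fun a p => a ++ [p]) acc
    | _, _ => acc
  else
    match PySem.Int.ofStr? token with
    | some p => acc ++ [p]
    | none => acc

-- loop body of A's filter/dedupe loop (state: output list, seen set)
def pvDedupStep (st : List Int × PySem.Set Int) (p : Int) : List Int × PySem.Set Int :=
  if p < 1 ∨ p > 65535 then st
  else if PySem.Set.contains st.2 p then st
  else (st.1 ++ [p], PySem.Set.add st.2 p)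

def parse_port_specification (start_port : Int) (end_port : Int) (port_spec : Option String) : List Int :=
  let ports : List Int :=
    match port_spec with
    | none => (PySem.List.pyRange start_port (end_port + 1) 1).foldl (fun acc p => acc ++ [p]) []
    | some spec => ((PySem.Str.split? spec ",").getD []).foldl pvStepA []
  let valid := (ports.foldl pvDedupStep ([], PySem.Set.empty)).1
  PySem.List.sorted valid (fun x => x) false

-- ===== PORT B =====
-- helper `add` of Source B: append the clipped interval if non-empty
def pvClipAdd (intervals : List (Int × Int)) (lo0 hi0 : Int) : List (Int × Int) :=
  let lo := max lo0 1
  let hi := min hi0 65535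
  if lo ≤ hi then intervals ++ [(lo, hi)] else intervals

-- loop body of B's token loop (same parsing; collects clipped intervals)
def pvStepB (acc : List (Int × Int)) (token0 : String) : List (Int × Int) :=
  let token := PySem.Str.strip token0
  if token = "" then acc
  else if PySem.Str.isIn "-" token then
    let parts := (PySem.Str.splitMax? token "-" 1).getD []
    match PySem.Int.ofStr? (parts.getD 0 ""), PySem.Int.ofStr? (parts.getD 1 "") with
    | some start, some stop =>
      let se := if start > stop then (stop, start) else (start, stop)
      pvClipAdd acc se.1 se.2
    | _, _ => acc
  else
    match PySem.Int.ofStr? token with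
    | some p => pvClipAdd acc p p
    | none => acc

-- loop body of B's fused merge-expand (state: output, highest port emitted)
def pvExpandStep (st : List Int × Int) (iv : Int × Int) : List Int × Int :=
  (st.1 ++ PySem.List.pyRange (max iv.1 (st.2 + 1)) (iv.2 + 1) 1, max st.2 iv.2)

def parse_port_specification_alt (start_port : Int) (end_port : Int) (port_spec : Option String) : List Int :=
  let intervals : List (Int × Int) :=
    match port_spec with
    | none => pvClipAdd [] start_port end_port
    | some spec => ((PySem.Str.split? spec ",").getD []).foldl pvStepB []
  let sortedIvs := PySem.List.sorted intervals (fun iv => iv.1) false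
  (sortedIvs.foldl pvExpandStep ([], 0)).1

-- ===== PRECONDITION & SPEC =====
def Spec_parse_port_specification (start_port : Int) (end_port : Int) (port_spec : Option String) (out : List Int) : Prop := out = parse_port_specification_alt start_port end_port port_spec
instance (start_port : Int) (end_port : Int) (port_spec : Option String) (out : List Int) : Decidable (Spec_parse_port_specification start_port end_port port_spec out) := by unfold Spec_parse_port_specification; infer_instance

-- ===== CLAIM (what is proved, stated in full; the proofs are below) =====
def Claim_equal_parse_port_specification : Prop := ∀ (start_port : Int) (end_port : Int) (port_spec : Option String), Dom_parse_port_specification start_port end_port port_spec → Spec_parse_port_specification start_port end_port port_spec (parse_port_specification start_port end_port port_spec)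

-- ===== LEMMAS AND PROOFS =====

-- the (start, stop) pair a token contributes (shared shape of both token loops)
def pvTokParse (token0 : String) : Option (Int × Int) :=
  let token := PySem.Str.strip token0
  if token = "" then none
  else if PySem.Str.isIn "-" token then
    let parts := (PySem.Str.splitMax? token "-" 1).getD []
    match PySem.Int.ofStr? (parts.getD 0 ""), PySem.Int.ofStr? (parts.getD 1 "") with
    | some start, some stop => some (if start > stop then (stop, start) else (start, stop))
    | _, _ => none
  else
    match PySem.Int.ofStr? token with
    | some p => some (p, p)
    | none => none

def pvClip? (iv : Int × Int) : Option (Int × Int) :=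
  if max iv.1 1 ≤ min iv.2 65535 then some (max iv.1 1, min iv.2 65535) else none

theorem pvFlattenSingleton {α : Type} (l : List α) : (List.map (fun x => [x]) l).flatten = l := by
  induction l with
  | nil => rfl
  | cons x xs ih => simp [ih]

theorem pvClipAdd_eq (acc : List (Int × Int)) (lo hi : Int) :
    pvClipAdd acc lo hi = acc ++ (pvClip? (lo, hi)).toList := by
  simp only [pvClipAdd, pvClip?]
  split <;> simp

theorem pvStepA_eq (acc : List Int) (t : String) :
    pvStepA acc t = acc ++ ((pvTokParse t).toList).flatMap (fun iv => PySem.List.pyRange iv.1 (iv.2 + 1) 1) := by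
  unfold pvStepA pvTokParse
  dsimp only
  split
  · simp
  · split
    · split
      · simp [pvFlattenSingleton]
      · simp
    · split <;> simp

theorem pvStepB_eq (acc : List (Int × Int)) (t : String) :
    pvStepB acc t = acc ++ ((pvTokParse t).bind pvClip?).toList := by
  unfold pvStepB pvTokParse
  dsimp only
  split
  · simp
  · split
    · split
      · simp [pvClipAdd_eq]
      · simp
    · split <;> simp [pvClipAdd_eq]

theorem pvA_ports_eq (toks : List String) (acc : List Int) :
    toks.foldl pvStepA acc
      = acc ++ (toks.filterMap pvTokParse).flatMap (fun iv => PySem.List.pyRange iv.1 (iv.2 + 1) 1) := by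
  induction toks generalizing acc with
  | nil => simp
  | cons t ts ih =>
    simp only [List.foldl_cons, List.filterMap_cons]
    rw [ih, pvStepA_eq]
    rcases pvTokParse t with _ | iv
    · simp only [Option.toList, List.flatMap_nil, List.append_nil]
    · simp only [Option.toList, List.flatMap_cons, List.flatMap_nil,
        List.append_nil, List.append_assoc]

theorem pvB_intervals_eq (toks : List String) (acc : List (Int × Int)) :
    toks.foldl pvStepB acc = acc ++ (toks.filterMap pvTokParse).filterMap pvClip? := by
  induction toks generalizing acc with
  | nil => simp
  | cons t ts ih =>
    simp only [List.foldl_cons, List.filterMap_cons]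
    rw [ih, pvStepB_eq]
    rcases h : pvTokParse t with _ | iv
    · simp
    · rcases h2 : pvClip? iv with _ | civ
      · simp only [h2, Option.toList, Option.bind_some, List.filterMap_cons, List.append_nil]
      · simp only [h2, Option.toList, Option.bind_some, List.filterMap_cons,
          List.append_assoc, List.singleton_append]

-- coverage of the clipped intervals = raw-range membership restricted to [1, 65535]
theorem pvCoverage (pairs : List (Int × Int)) (p : Int) :
    (∃ iv ∈ pairs.filterMap pvClip?, iv.1 ≤ p ∧ p ≤ iv.2)
      ↔ (p ∈ pairs.flatMap (fun iv => PySem.List.pyRange iv.1 (iv.2 + 1) 1) ∧ 1 ≤ p ∧ p ≤ 65535) := by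
  induction pairs with
  | nil => simp
  | cons iv ivs ih =>
    simp only [List.filterMap_cons, List.flatMap_cons, List.mem_append, PySem.List.mem_pyRange_one]
    rcases h : pvClip? iv with _ | civ
    · simp only [pvClip?] at h
      split at h
      · exact absurd h (by simp)
      · rename_i hc
        constructor
        · rintro ⟨jv, hj, hle⟩
          rcases ih.mp ⟨jv, hj, hle⟩ with ⟨hm, hb⟩
          exact ⟨Or.inr hm, hb⟩
        · rintro ⟨hm | hm, hb⟩
          · omega
          · exact ih.mpr ⟨hm, hb⟩
    · simp only [pvClip?] at h
      split at h
      · rename_i hc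
        injection h with h; subst h
        simp only [List.mem_cons]
        constructor
        · rintro ⟨jv, hj | hj, hle⟩
          · subst hj
            simp only at hle
            exact ⟨Or.inl (by omega), by omega⟩
          · rcases ih.mp ⟨jv, hj, hle⟩ with ⟨hm, hb⟩
            exact ⟨Or.inr hm, hb⟩
        · rintro ⟨hm | hm, hb⟩
          · exact ⟨(max iv.1 1, min iv.2 65535), Or.inl rfl, by constructor <;> simp <;> omega⟩
          · rcases ih.mpr ⟨hm, hb⟩ with ⟨jv, hj, hle⟩
            exact ⟨jv, Or.inr hj, hle⟩
      · exact absurd h (by simp)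

-- A's filter/dedupe loop: the seen set stays equal to the output list, which is
-- the nodup list of valid ports in first-occurrence order
theorem pvDedup_fold (l : List Int) (out : List Int) (hnd : out.Nodup) :
    (l.foldl pvDedupStep (out, out)).1.Nodup
    ∧ ∀ q, (q ∈ (l.foldl pvDedupStep (out, out)).1 ↔ q ∈ out ∨ (q ∈ l ∧ 1 ≤ q ∧ q ≤ 65535)) := by
  induction l generalizing out with
  | nil => simp [hnd]
  | cons x xs ih =>
    simp only [List.foldl_cons]
    by_cases hx : x < 1 ∨ x > 65535
    · rw [show pvDedupStep (out, out) x = (out, out) by simp [pvDedupStep, hx]]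
      rcases ih out hnd with ⟨h2, h3⟩
      refine ⟨h2, fun q => ?_⟩
      rw [h3 q]
      simp only [List.mem_cons]
      constructor
      · rintro (h | ⟨h, hb⟩)
        · exact Or.inl h
        · exact Or.inr ⟨Or.inr h, hb⟩
      · rintro (h | ⟨h | h, hb⟩)
        · exact Or.inl h
        · omega
        · exact Or.inr ⟨h, hb⟩
    · by_cases hseen : PySem.Set.contains out x
      · have hmem : x ∈ out := (PySem.Set.contains_iff out x).mp hseen
        rw [show pvDedupStep (out, out) x = (out, out) by simp [pvDedupStep, hx, hmem]]
        rcases ih out hnd with ⟨h2, h3⟩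
        refine ⟨h2, fun q => ?_⟩
        rw [h3 q]
        simp only [List.mem_cons]
        constructor
        · rintro (h | ⟨h, hb⟩)
          · exact Or.inl h
          · exact Or.inr ⟨Or.inr h, hb⟩
        · rintro (h | ⟨h | h, hb⟩)
          · exact Or.inl h
          · subst h; exact Or.inl hmem
          · exact Or.inr ⟨h, hb⟩
      · have hmem : x ∉ out := fun h => hseen ((PySem.Set.contains_iff out x).mpr h)
        have hstep : pvDedupStep (out, out) x = (out ++ [x], out ++ [x]) := by
          simp [pvDedupStep, hx, hmem, PySem.Set.add]
        rw [hstep]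
        have hnd' : (out ++ [x]).Nodup := by
          rw [List.nodup_append]
          refine ⟨hnd, List.nodup_singleton x, ?_⟩
          intro a ha b hb
          rw [List.mem_singleton] at hb
          subst hb
          exact fun h => hmem (h ▸ ha)
        rcases ih (out ++ [x]) hnd' with ⟨h2, h3⟩
        refine ⟨h2, fun q => ?_⟩
        rw [h3 q]
        simp only [List.mem_append, List.mem_cons, List.not_mem_nil, or_false]
        constructor
        · rintro ((h | h) | ⟨h, hb⟩)
          · exact Or.inl h
          · exact Or.inr ⟨Or.inl h, by omega⟩
          · exact Or.inr ⟨Or.inr h, hb⟩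
        · rintro (h | ⟨h | h, hb⟩)
          · exact Or.inl (Or.inl h)
          · exact Or.inl (Or.inr h)
          · exact Or.inr ⟨h, hb⟩

-- B's fused merge-expand over intervals sorted by start: strictly increasing
-- output whose membership is the union of the intervals
theorem pvExpand_fold (ivs : List (Int × Int)) (out : List Int) (m : Int)
    (hsort : ivs.Pairwise (fun a b => a.1 ≤ b.1))
    (hout : out.Pairwise (· < ·))
    (hle : ∀ q ∈ out, q ≤ m)
    (hcov : ∀ q ≤ m, (∃ iv ∈ ivs, iv.1 ≤ q ∧ q ≤ iv.2) → q ∈ out) :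
    (ivs.foldl pvExpandStep (out, m)).1.Pairwise (· < ·)
    ∧ ∀ q, (q ∈ (ivs.foldl pvExpandStep (out, m)).1
        ↔ q ∈ out ∨ ∃ iv ∈ ivs, iv.1 ≤ q ∧ q ≤ iv.2) := by
  induction ivs generalizing out m with
  | nil => simp [hout]
  | cons iv ivs ih =>
    simp only [List.foldl_cons, pvExpandStep]
    have hmemnew : ∀ q, q ∈ out ++ PySem.List.pyRange (max iv.1 (m + 1)) (iv.2 + 1) 1
        ↔ q ∈ out ∨ (iv.1 ≤ q ∧ q ≤ iv.2) := by
      intro q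
      simp only [List.mem_append, PySem.List.mem_pyRange_one]
      constructor
      · rintro (h | h)
        · exact Or.inl h
        · exact Or.inr (by omega)
      · rintro (h | h)
        · exact Or.inl h
        · by_cases hq : max iv.1 (m + 1) ≤ q
          · exact Or.inr (by omega)
          · exact Or.inl (hcov q (by omega) ⟨iv, List.mem_cons_self, h⟩)
    have hout' : (out ++ PySem.List.pyRange (max iv.1 (m + 1)) (iv.2 + 1) 1).Pairwise (· < ·) := by
      rw [List.pairwise_append]
      refine ⟨hout, PySem.List.pairwise_lt_pyRange_one _ _, ?_⟩
      intro a ha b hb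
      have := hle a ha
      have := (PySem.List.mem_pyRange_one.mp hb).1
      omega
    have hle' : ∀ q ∈ out ++ PySem.List.pyRange (max iv.1 (m + 1)) (iv.2 + 1) 1, q ≤ max m iv.2 := by
      intro q hq
      rcases List.mem_append.mp hq with h | h
      · have := hle q h; omega
      · have := (PySem.List.mem_pyRange_one.mp h).2; omega
    have hcov' : ∀ q ≤ max m iv.2, (∃ jv ∈ ivs, jv.1 ≤ q ∧ q ≤ jv.2) →
        q ∈ out ++ PySem.List.pyRange (max iv.1 (m + 1)) (iv.2 + 1) 1 := by
      rintro q hq ⟨jv, hjv, hb⟩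
      have hiv1 : iv.1 ≤ jv.1 := (List.pairwise_cons.mp hsort).1 jv hjv
      by_cases hqiv : q ≤ iv.2
      · exact (hmemnew q).mpr (Or.inr ⟨by omega, hqiv⟩)
      · have hqm : q ≤ m := by omega
        exact List.mem_append.mpr (Or.inl (hcov q hqm ⟨jv, List.mem_cons_of_mem _ hjv, hb⟩))
    rcases ih (out ++ PySem.List.pyRange (max iv.1 (m + 1)) (iv.2 + 1) 1) (max m iv.2)
        (List.Pairwise.of_cons hsort) hout' hle' hcov' with ⟨h1, h2⟩
    refine ⟨h1, fun q => ?_⟩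
    rw [h2 q, hmemnew q]
    simp only [List.mem_cons]
    constructor
    · rintro ((h | h) | ⟨jv, hj, hb⟩)
      · exact Or.inl h
      · exact Or.inr ⟨iv, Or.inl rfl, h⟩
      · exact Or.inr ⟨jv, Or.inr hj, hb⟩
    · rintro (h | ⟨jv, rfl | hj, hb⟩)
      · exact Or.inl (Or.inl h)
      · exact Or.inl (Or.inr hb)
      · exact Or.inr ⟨jv, hj, hb⟩

-- the (start, stop) pairs the whole input contributes
def pvPairs (start_port : Int) (end_port : Int) (port_spec : Option String) : List (Int × Int) :=
  match port_spec with
  | none => [(start_port, end_port)]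
  | some spec => ((PySem.Str.split? spec ",").getD []).filterMap pvTokParse

-- assembled: A's sort of the deduped valid ports = B's expansion of the
-- sorted clipped intervals, for any common list of (start, stop) pairs
theorem pvMain (pairs : List (Int × Int)) :
    PySem.List.sorted ((pairs.flatMap (fun iv => PySem.List.pyRange iv.1 (iv.2 + 1) 1)).foldl
        pvDedupStep ([], PySem.Set.empty)).1 (fun x => x) false
    = ((PySem.List.sorted (pairs.filterMap pvClip?) (fun iv => iv.1) false).foldl pvExpandStep ([], 0)).1 := by
  have he : (([], PySem.Set.empty) : List Int × PySem.Set Int) = ([], []) := rfl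
  rw [he]
  rcases pvDedup_fold (pairs.flatMap (fun iv => PySem.List.pyRange iv.1 (iv.2 + 1) 1)) [] List.nodup_nil
    with ⟨hAnd, hAmem⟩
  set sIvs := PySem.List.sorted (pairs.filterMap pvClip?) (fun iv => iv.1) false with hsIvs
  have hsort : sIvs.Pairwise (fun a b => a.1 ≤ b.1) := PySem.List.sorted_pairwise _ _
  rcases pvExpand_fold sIvs [] 0 hsort List.Pairwise.nil (by simp) (by
      rintro q hq ⟨iv, hiv, hb⟩
      have hmemf : iv ∈ pairs.filterMap pvClip? := (PySem.List.mem_sorted _ _ _ _).mp hiv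
      rcases List.mem_filterMap.mp hmemf with ⟨jv, _, hj⟩
      simp only [pvClip?] at hj
      split at hj
      · injection hj with hj; subst hj
        simp only at hb
        omega
      · exact absurd hj (by simp)) with ⟨hBpw, hBmem⟩
  have hBnd : ((PySem.List.sorted (pairs.filterMap pvClip?) (fun iv => iv.1) false).foldl
      pvExpandStep ([], 0)).1.Nodup := List.Pairwise.imp (fun h => ne_of_lt h) hBpw
  have hiff : ∀ q, q ∈ (sIvs.foldl pvExpandStep ([], 0)).1 ↔
      q ∈ ((pairs.flatMap fun iv => PySem.List.pyRange iv.1 (iv.2 + 1) 1).foldl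
        pvDedupStep (([] : List Int), ([] : PySem.Set Int))).1 := by
    intro q
    rw [hAmem q, hBmem q]
    simp only [List.not_mem_nil, false_or]
    have hms : (∃ iv ∈ sIvs, iv.1 ≤ q ∧ q ≤ iv.2) ↔ ∃ iv ∈ pairs.filterMap pvClip?, iv.1 ≤ q ∧ q ≤ iv.2 := by
      constructor <;> rintro ⟨iv, hiv, hb⟩
      · exact ⟨iv, (PySem.List.mem_sorted _ _ _ _).mp hiv, hb⟩
      · exact ⟨iv, (PySem.List.mem_sorted _ _ _ _).mpr hiv, hb⟩
    rw [hms]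
    exact pvCoverage pairs q
  exact PySem.List.sorted_eq_of_perm_of_pairwise_lt _ _ _
    ((List.perm_ext_iff_of_nodup hBnd hAnd).mpr hiff) hBpw

-- ===== VERDICT (by name: the statement is the Claim_ definition above) =====
theorem parse_port_specification_spec : Claim_equal_parse_port_specification := by
  intro start_port end_port port_spec _
  unfold Spec_parse_port_specification
  have hmain := pvMain (pvPairs start_port end_port port_spec)
  cases port_spec with
  | none =>
    rw [show parse_port_specification start_port end_port none
        = PySem.List.sorted (((pvPairs start_port end_port none).flatMap
            (fun iv => PySem.List.pyRange iv.1 (iv.2 + 1) 1)).foldl pvDedupStep ([], PySem.Set.empty)).1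
            (fun x => x) false from by
          unfold parse_port_specification pvPairs
          dsimp only
          rw [PySem.List.foldl_append_singleton]
          simp only [List.flatMap_cons, List.flatMap_nil, List.append_nil, List.nil_append],
      show parse_port_specification_alt start_port end_port none
        = (((PySem.List.sorted ((pvPairs start_port end_port none).filterMap pvClip?)
            (fun iv => iv.1) false)).foldl pvExpandStep ([], 0)).1 from by
          unfold parse_port_specification_alt pvPairs
          dsimp only
          rw [pvClipAdd_eq]
          rcases h : pvClip? (start_port, end_port) with _ | c <;>
            simp [h]]
    exact pvMain _
  | some spec =>
    rw [show parse_port_specification start_port end_port (some spec)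
        = PySem.List.sorted (((pvPairs start_port end_port (some spec)).flatMap
            (fun iv => PySem.List.pyRange iv.1 (iv.2 + 1) 1)).foldl pvDedupStep ([], PySem.Set.empty)).1
            (fun x => x) false from by
          unfold parse_port_specification pvPairs
          dsimp only
          rw [pvA_ports_eq]
          simp only [List.nil_append],
      show parse_port_specification_alt start_port end_port (some spec)
        = (((PySem.List.sorted ((pvPairs start_port end_port (some spec)).filterMap pvClip?)
            (fun iv => iv.1) false)).foldl pvExpandStep ([], 0)).1 from by
          unfold parse_port_specification_alt pvPairs
          dsimp only
          rw [pvB_intervals_eq]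
          simp only [List.nil_append]]
    exact pvMain _
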